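-- pv_equiv track=rewrite | github.com/yariks5s/lab_theor_prog | main.py | parse_AS
-- ===== SOURCE A (Python) =====
-- def parse_AS(words) -> list:
--     for i in range(1, len(words) - 1):
--         if words[i] == ":=":
--             words[i] = "AS_" + words[i-1] + f"({words[i+1]})"
--             words.pop(i+1)
--             words.pop(i-1)
--             return parse_AS(words)
--     return words
-- ===== SOURCE B (Python) =====
-- def parse_AS(words) -> list:
--     out = []
--     i = 0
--     n = len(words)
--     while i < n:
--         w = words[i]
--         i += 1
--         if w == ":=" and out and i < n:
--             prev = out.pop()
--             out.append("AS_" + prev + "(" + words[i] + ")")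
--             i += 1
--         else:
--             out.append(w)
--     return out
-- ===== Notes on version B (the rewrite author's own statement) =====
-- stated objective: alternative
-- what changed: A rescans the whole list from index 1 and recurses after every single collapse; B makes one left-to-right pass keeping already-processed tokens on a stack, combining the stack top with the next input token at each ':='.
import Mathlib
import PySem

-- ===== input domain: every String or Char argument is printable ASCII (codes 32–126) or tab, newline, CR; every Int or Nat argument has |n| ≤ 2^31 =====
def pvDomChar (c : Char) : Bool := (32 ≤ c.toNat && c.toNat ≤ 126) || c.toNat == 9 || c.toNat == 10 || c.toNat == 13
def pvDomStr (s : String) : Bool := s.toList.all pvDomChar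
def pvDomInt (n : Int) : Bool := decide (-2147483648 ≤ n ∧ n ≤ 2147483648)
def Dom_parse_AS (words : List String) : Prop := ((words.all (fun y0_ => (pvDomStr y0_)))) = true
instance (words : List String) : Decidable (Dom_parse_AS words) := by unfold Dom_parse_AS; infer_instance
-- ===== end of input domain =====

-- B replaces A's restart-from-index-1 rescan after every collapse by a single left-to-right
-- stack pass; only the RETURN value is claimed equal (A mutates its argument list, B does not).

-- ===== PORT A =====
-- 'for i in range(1, len(words) - 1): if words[i] == ":=": … return' — the scan for the
-- first collapsible ':=' (index i with 1 ≤ i and i + 1 < len); none = loop fell through.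
def parseScanA (words : List String) (i : Nat) : Option Nat :=
  if i + 1 < words.length then
    if words.getD i "" = ":=" then some i else parseScanA words (i + 1)
  else none
termination_by words.length - i

theorem parseScanA_some_bounds (words : List String) (i j : Nat)
    (h : parseScanA words i = some j) : i ≤ j ∧ j + 1 < words.length := by
  fun_induction parseScanA words i with
  | case1 w hlt htrue => simp at h; omega
  | case2 w hlt hfalse ih => have := ih h; omega
  | case3 w hge => simp at h

def parse_AS (words : List String) : List String :=
  match h : parseScanA words 1 with
  | none => words
  | some i =>
      -- words[i] = "AS_" + words[i-1] + f"({words[i+1]})"; words.pop(i+1); words.pop(i-1)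
      parse_AS (((words.set i ("AS_" ++ words.getD (i - 1) "" ++ "(" ++ words.getD (i + 1) "" ++ ")")).eraseIdx (i + 1)).eraseIdx (i - 1))
termination_by words.length
decreasing_by
  have hb := parseScanA_some_bounds words 1 i h
  rw [List.length_eraseIdx, List.length_eraseIdx, List.length_set]
  split <;> split <;> omega

-- ===== PORT B =====
-- Source B's while loop: out is the stack (head = top), rest the not-yet-consumed suffix of words.
def parseLoopB (out : List String) (rest : List String) : List String :=
  match rest with
  | [] => out.reverse
  | w :: rest' =>
      if w = ":=" ∧ out ≠ [] ∧ rest' ≠ [] then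
        parseLoopB (("AS_" ++ out.headD "" ++ "(" ++ rest'.headD "" ++ ")") :: out.tail) rest'.tail
      else
        parseLoopB (w :: out) rest'
termination_by rest.length
decreasing_by
  · rw [List.length_tail, List.length_cons]; omega
  · rw [List.length_cons]; omega

def parse_AS_alt (words : List String) : List String := parseLoopB [] words

-- ===== PRECONDITION & SPEC =====
def Spec_parse_AS (words : List String) (out : List String) : Prop := out = parse_AS_alt words
instance (words : List String) (out : List String) : Decidable (Spec_parse_AS words out) := by unfold Spec_parse_AS; infer_instance

-- ===== CLAIM (what is proved, stated in full; the proofs are below) =====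
def Claim_equal_parse_AS : Prop := ∀ (words : List String), Dom_parse_AS words → Spec_parse_AS words (parse_AS words)

-- ===== LEMMAS AND PROOFS =====

-- Unfolding equations for parse_AS.
theorem parse_AS_eq_none {w : List String} (h : parseScanA w 1 = none) : parse_AS w = w := by
  rw [parse_AS.eq_def]; split <;> simp_all

theorem parse_AS_eq_some {w : List String} {i : Nat} (h : parseScanA w 1 = some i) :
    parse_AS w = parse_AS (((w.set i ("AS_" ++ w.getD (i - 1) "" ++ "(" ++ w.getD (i + 1) "" ++ ")")).eraseIdx (i + 1)).eraseIdx (i - 1)) := by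
  rw [parse_AS.eq_def]; split
  · simp_all
  · next j hj => rw [h] at hj; cases hj; rfl

-- Stack invariant of B's loop: ':=' occurs in the stack at most as its bottom element
-- (the last element of `out`, since the head of `out` is the top of the stack).
def StackInv (out : List String) : Prop :=
  ∀ j : Nat, j + 1 < out.length → out.getD j "" ≠ ":="

theorem stackInv_nil : StackInv [] := by intro j h; simp at h

theorem stackInv_singleton (w : String) : StackInv [w] := by intro j h; simp at h

theorem stackInv_tail {out : List String} (h : StackInv out) : StackInv out.tail := by
  intro j hj
  cases out with
  | nil => simp at hj
  | cons p out' =>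
      have := h (j + 1) (by simp at hj ⊢; omega)
      simpa using this

theorem stackInv_cons {w : String} {out : List String} (hw : w ≠ ":=") (h : StackInv out) :
    StackInv (w :: out) := by
  intro j hj
  cases j with
  | zero => simpa using hw
  | succ k =>
      have := h k (by simp at hj ⊢; omega)
      simpa using this

theorem as_ne_colon (p q : String) : ("AS_" ++ p ++ "(" ++ q ++ ")") ≠ ":=" := by
  intro h
  have h' : ("AS_" ++ p ++ "(" ++ q ++ ")").toList = (":=" : String).toList := by rw [h]
  simp [String.toList_append] at h'

-- eraseIdx at an offset past a left append block.
theorem erase_append_len (l r : List String) (k : Nat) :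
    (l ++ r).eraseIdx (l.length + k) = l ++ r.eraseIdx k := by
  induction l with
  | nil => simp
  | cons a t ih => simpa [Nat.succ_add] using ih

-- A finds no collapsible ':=' (scan from i returns none) when no interior position ≥ i holds ':='.
theorem parseScanA_none (words : List String) (i : Nat)
    (h : ∀ j : Nat, i ≤ j → j + 1 < words.length → words.getD j "" ≠ ":=") :
    parseScanA words i = none := by
  fun_induction parseScanA words i with
  | case1 w hlt htrue => exact absurd htrue (h _ le_rfl hlt)
  | case2 w hlt hfalse ih => exact ih fun j hij hj => h j (by omega) hj
  | case3 w hge => rfl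

theorem parseScanA_first (words : List String) (i j : Nat) (hij : i ≤ j)
    (hjlt : j + 1 < words.length) (hget : words.getD j "" = ":=")
    (hmin : ∀ k : Nat, i ≤ k → k < j → words.getD k "" ≠ ":=") :
    parseScanA words i = some j := by
  fun_induction parseScanA words i with
  | case1 w hlt htrue =>
      have hw : ¬ w < j := fun hlt' => hmin w le_rfl hlt' htrue
      have : w = j := by omega
      rw [this]
  | case2 w hlt hfalse ih =>
      have hwj : w ≠ j := fun he => hfalse (he ▸ hget)
      exact ih (by omega) (fun k hk hkj => hmin k (by omega) hkj)
  | case3 w hge => omega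

-- Positions 1 .. s.length-1 of s.reverse ++ rest hold no ':=' when the stack invariant holds.
theorem reverse_getD {s : List String} {j : Nat} (hj : j < s.length) :
    s.reverse.getD j "" = s.getD (s.length - 1 - j) "" := by
  rw [List.getD_eq_getElem?_getD, List.getD_eq_getElem?_getD, List.getElem?_reverse hj]

theorem inv_prefix (s rest : List String) (hs : StackInv s) :
    ∀ j : Nat, 1 ≤ j → j < s.length → (s.reverse ++ rest).getD j "" ≠ ":=" := by
  intro j h1 hj
  rw [List.getD_eq_getElem?_getD, List.getElem?_append_left (by simpa using hj),
    ← List.getD_eq_getElem?_getD, reverse_getD hj]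
  exact hs _ (by omega)

-- With at most one token left unconsumed, A's rescan of the current list finds nothing.
theorem parse_AS_fix (s rest : List String) (hs : StackInv s) (hr : rest.length ≤ 1) :
    parse_AS (s.reverse ++ rest) = s.reverse ++ rest := by
  apply parse_AS_eq_none
  apply parseScanA_none
  intro j hj1 hj
  rw [List.length_append, List.length_reverse] at hj
  exact inv_prefix s rest hs j hj1 (by omega)

-- Main loop invariant: running A on s.reverse ++ rest equals B's loop from state (s, rest).
theorem loop_eq (n : Nat) : ∀ (rest s : List String), rest.length ≤ n → StackInv s →
    parse_AS (s.reverse ++ rest) = parseLoopB s rest := by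
  induction n with
  | zero =>
      intro rest s hn hs
      have : rest = [] := List.length_eq_zero_iff.mp (Nat.le_zero.mp hn)
      subst this
      rw [parseLoopB]
      simpa using parse_AS_fix s [] hs (by simp)
  | succ n ih =>
      intro rest s hn hs
      match rest with
      | [] =>
          rw [parseLoopB]
          simpa using parse_AS_fix s [] hs (by simp)
      | w :: rest' =>
          rw [parseLoopB]
          by_cases hc : w = ":=" ∧ s ≠ [] ∧ rest' ≠ []
          · obtain ⟨hw, hs0, hr0⟩ := hc
            rw [if_pos ⟨hw, hs0, hr0⟩]
            subst hw
            match s, rest' with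
            | p :: s', nxt :: rest'' =>
              -- the combined list, with the ':=' sitting at index s.length
              set t : String := "AS_" ++ p ++ "(" ++ nxt ++ ")" with ht
              have hscan : parseScanA ((p :: s').reverse ++ ":=" :: nxt :: rest'') 1
                  = some (s'.length + 1) := by
                apply parseScanA_first _ _ _ (by omega)
                · simp; omega
                · simp
                · intro k hk1 hklt
                  exact inv_prefix (p :: s') _ hs k hk1 (by simpa using hklt)
              rw [parse_AS_eq_some hscan]
              have hgprev : ((p :: s').reverse ++ ":=" :: nxt :: rest'').getD (s'.length + 1 - 1) "" = p := by
                simp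
              have hgnext : ((p :: s').reverse ++ ":=" :: nxt :: rest'').getD (s'.length + 1 + 1) "" = nxt := by
                simp [List.reverse_cons, List.append_assoc, Nat.add_assoc]
              rw [hgprev, hgnext, ← ht]
              have hset : ((p :: s').reverse ++ ":=" :: nxt :: rest'').set (s'.length + 1) t
                  = (p :: s').reverse ++ t :: nxt :: rest'' := by
                simp
              have herase1 : ((p :: s').reverse ++ t :: nxt :: rest'').eraseIdx (s'.length + 1 + 1)
                  = (p :: s').reverse ++ t :: rest'' := by
                have := erase_append_len (p :: s').reverse (t :: nxt :: rest'') 1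
                simpa [Nat.add_assoc] using this
              have herase2 : ((p :: s').reverse ++ t :: rest'').eraseIdx (s'.length + 1 - 1)
                  = s'.reverse ++ t :: rest'' := by
                have := erase_append_len s'.reverse ([p] ++ t :: rest'') 0
                simpa [List.reverse_cons, List.append_assoc] using this
              rw [hset, herase1, herase2]
              have hrw : s'.reverse ++ t :: rest'' = (t :: s').reverse ++ rest'' := by
                simp
              rw [hrw]
              have hinv' : StackInv (t :: s') :=
                stackInv_cons (as_ne_colon p nxt) (stackInv_tail (out := p :: s') hs)
              have := ih rest'' (t :: s') (by simp at hn; omega) hinv'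
              simpa using this
          · rw [if_neg hc]
            by_cases hend : w = ":=" ∧ s ≠ [] ∧ rest' = []
            · obtain ⟨hw, hs0, hr0⟩ := hend
              subst hw; subst hr0
              rw [parseLoopB]
              have := parse_AS_fix s [":="] hs (by simp)
              simpa using this
            · have hinv' : StackInv (w :: s) := by
                rcases List.eq_nil_or_concat' s with h0 | _
                · subst h0; exact stackInv_singleton w
                · have hw : w ≠ ":=" := by
                    intro he
                    rcases List.eq_nil_or_concat' rest' with h1 | _
                    · exact hend ⟨he, by simp_all, h1⟩
                    · exact hc ⟨he, by simp_all, by simp_all⟩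
                  exact stackInv_cons hw hs
              have := ih rest' (w :: s) (by simp at hn; omega) hinv'
              rw [← this]
              simp

-- ===== VERDICT (by name: the statement is the Claim_ definition above) =====
theorem parse_AS_spec : Claim_equal_parse_AS := by
  intro words _
  unfold Spec_parse_AS parse_AS_alt
  simpa using loop_eq words.length words [] le_rfl stackInv_nil
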